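-- pv_equiv track=rewrite | github.com/Iansdfg/9chap | 5Two pointers/382. Triangle Count.py | greater_than
-- ===== SOURCE A (Python) =====
-- def greater_than(nums, target):
--     nums.sort()
--     ans = 0
--     left, right = 0, len(nums)-1
--     while left<right:
--         two_sum = nums[left] + nums[right]
--         if two_sum>target:
--             ans+=right-left
--             right-=1
--         else:
--             left+=1
--     return ans
-- ===== SOURCE B (Python) =====
-- def greater_than(nums, target):
--     nums.sort()
--     ans = 0
--     for j in range(len(nums)):
--         lo, hi = 0, j
--         while lo < hi:
--             mid = (lo + hi) // 2
--             if nums[mid] > target - nums[j]: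
--                 hi = mid
--             else:
--                 lo = mid + 1
--         ans += j - lo
--     return ans
-- ===== Notes on version B (the rewrite author's own statement) =====
-- stated objective: alternative
-- what changed: Replaced the two-pointer sweep after sorting by a per-index hand-written binary search over the sorted prefix nums[0:j], adding j minus the first position whose element exceeds target - nums[j]; both sort nums in place.
import Mathlib
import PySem

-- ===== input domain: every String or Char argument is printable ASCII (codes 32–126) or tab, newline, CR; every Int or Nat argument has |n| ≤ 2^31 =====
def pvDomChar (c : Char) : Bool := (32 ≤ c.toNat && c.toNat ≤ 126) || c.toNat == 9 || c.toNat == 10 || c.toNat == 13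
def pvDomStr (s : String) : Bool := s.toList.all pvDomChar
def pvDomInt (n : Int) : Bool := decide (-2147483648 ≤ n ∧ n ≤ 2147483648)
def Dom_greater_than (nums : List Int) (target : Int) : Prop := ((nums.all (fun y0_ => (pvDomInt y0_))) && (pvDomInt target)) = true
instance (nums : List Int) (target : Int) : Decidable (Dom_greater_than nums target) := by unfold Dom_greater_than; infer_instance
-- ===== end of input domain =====

-- B replaces A's two-pointer sweep with a per-index binary search over the sorted prefix (alternative
-- algorithm, same asymptotic cost). Both A and B sort nums in place; the equivalence proved here is
-- about the RETURN value only.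


-- ===== PORT A =====
-- 'while left < right' two-pointer loop of A; indices are Nat (they never go negative in Python either:
-- left only increases from 0, right only decreases while left < right).
def gtLoopA (s : List Int) (target : Int) (left right : Nat) (ans : Int) : Int :=
  if _h : left < right then
    let two_sum := s.getD left 0 + s.getD right 0
    if two_sum > target then
      gtLoopA s target left (right - 1) (ans + ((right : Int) - (left : Int)))
    else
      gtLoopA s target (left + 1) right ans
  else ans
termination_by right - left

def greater_than (nums : List Int) (target : Int) : Int :=
  let s := PySem.List.sorted nums (fun x => x) false   -- nums.sort()
  gtLoopA s target 0 (s.length - 1) 0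

-- ===== PORT B =====
-- hand-written binary search of Source B: first index in [lo, hi) whose element is > target - nums[j]
def gtBS (s : List Int) (x : Int) (lo hi : Nat) : Nat :=
  if _h : lo < hi then
    let mid := (lo + hi) / 2
    if s.getD mid 0 > x then gtBS s x lo mid else gtBS s x (mid + 1) hi
  else lo
termination_by hi - lo

def greater_than_alt (nums : List Int) (target : Int) : Int :=
  let s := PySem.List.sorted nums (fun x => x) false   -- nums.sort()
  (List.range s.length).foldl
    (fun (ans : Int) (j : Nat) => ans + ((j : Int) - (gtBS s (target - s.getD j 0) 0 j : Int))) 0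

-- ===== PRECONDITION & SPEC =====
def Spec_greater_than (nums : List Int) (target : Int) (out : Int) : Prop := out = greater_than_alt nums target
instance (nums : List Int) (target : Int) (out : Int) : Decidable (Spec_greater_than nums target out) := by unfold Spec_greater_than; infer_instance

-- ===== CLAIM (what is proved, stated in full; the proofs are below) =====
def Claim_equal_greater_than : Prop := ∀ (nums : List Int) (target : Int), Dom_greater_than nums target → Spec_greater_than nums target (greater_than nums target)

-- ===== LEMMAS AND PROOFS =====

-- number of a in [l, b) with s[a] + s[b] > t
def gtCnt (s : List Int) (t : Int) (l b : Nat) : Nat :=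
  ((Finset.Ico l b).filter (fun a => t < s.getD a 0 + s.getD b 0)).card

-- number of pairs l ≤ a < b ≤ r with s[a] + s[b] > t
def gtPairs (s : List Int) (t : Int) (l r : Nat) : Nat :=
  ∑ b ∈ Finset.Ico l (r + 1), gtCnt s t l b

theorem gtMono (s : List Int) (hs : s.Pairwise (· ≤ ·)) {a b : Nat}
    (hab : a ≤ b) (hb : b < s.length) : s.getD a 0 ≤ s.getD b 0 := by
  rcases eq_or_lt_of_le hab with rfl | h
  · exact le_refl _
  · have ha : a < s.length := lt_trans h hb
    rw [List.getD_eq_getElem _ _ ha, List.getD_eq_getElem _ _ hb]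
    exact List.pairwise_iff_getElem.mp hs a b ha hb h

theorem gtCnt_self (s : List Int) (t : Int) (l : Nat) : gtCnt s t l l = 0 := by
  simp [gtCnt]

theorem gtPairs_exit (s : List Int) (t : Int) {l r : Nat} (hrl : r ≤ l) :
    gtPairs s t l r = 0 := by
  unfold gtPairs
  rcases eq_or_lt_of_le hrl with rfl | hlt
  · rw [Finset.sum_Ico_succ_top (le_refl _)]
    simp [gtCnt_self]
  · rw [Finset.Ico_eq_empty (by omega)]; simp

theorem gtPairs_high (s : List Int) (t : Int) (hs : s.Pairwise (· ≤ ·)) {l r : Nat}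
    (hlr : l < r) (hr : r < s.length) (ht : t < s.getD l 0 + s.getD r 0) :
    gtPairs s t l r = (r - l) + gtPairs s t l (r - 1) := by
  unfold gtPairs
  rw [Finset.sum_Ico_succ_top (le_of_lt hlr)]
  have hr1 : r - 1 + 1 = r := by omega
  rw [hr1]
  have hcnt : gtCnt s t l r = r - l := by
    unfold gtCnt
    rw [Finset.filter_true_of_mem, Nat.card_Ico]
    intro a ha
    rcases Finset.mem_Ico.mp ha with ⟨hal, har⟩
    have : s.getD l 0 ≤ s.getD a 0 := gtMono s hs hal (lt_trans har hr)
    omega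
  omega

theorem gtPairs_low (s : List Int) (t : Int) (hs : s.Pairwise (· ≤ ·)) {l r : Nat}
    (hlr : l < r) (hr : r < s.length) (ht : s.getD l 0 + s.getD r 0 ≤ t) :
    gtPairs s t l r = gtPairs s t (l + 1) r := by
  unfold gtPairs
  rw [Finset.sum_eq_sum_Ico_succ_bot (by omega : l < r + 1), gtCnt_self, Nat.zero_add]
  refine Finset.sum_congr rfl ?_
  intro b hb
  rcases Finset.mem_Ico.mp hb with ⟨hbl, hbr⟩
  unfold gtCnt
  rw [← Finset.insert_Ico_add_one_left_eq_Ico (by omega : l < b), Finset.filter_insert]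
  have hblen : b < s.length := by omega
  have hsb : s.getD b 0 ≤ s.getD r 0 := gtMono s hs (by omega) hr
  rw [if_neg (by omega)]

theorem gtLoopA_eq (s : List Int) (t : Int) (hs : s.Pairwise (· ≤ ·)) :
    ∀ l r ans, r < s.length → gtLoopA s t l r ans = ans + (gtPairs s t l r : Int) := by
  intro l r ans
  fun_induction gtLoopA s t l r ans with
  | case1 l r ans h two_sum hgt ih =>
    intro hr
    have hr1 : r - 1 < s.length := by omega
    rw [ih hr1, gtPairs_high s t hs h hr (by simpa [two_sum] using hgt)]
    have : ((r - l : Nat) : Int) = (r : Int) - (l : Int) := by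
      push_cast [Nat.cast_sub (le_of_lt h)]; ring
    push_cast
    omega
  | case2 l r ans h two_sum hle ih =>
    intro hr
    rw [ih hr, gtPairs_low s t hs h hr (by simpa [two_sum] using hle)]
  | case3 l r ans h =>
    intro hr
    rw [gtPairs_exit s t (by omega)]
    simp

theorem gtBS_inv (s : List Int) (x : Int) (hs : s.Pairwise (· ≤ ·)) (j : Nat)
    (hj : j ≤ s.length) :
    ∀ lo hi, lo ≤ hi → hi ≤ j → (∀ i, i < lo → s.getD i 0 ≤ x) →
      (∀ i, hi ≤ i → i < j → x < s.getD i 0) →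
      gtBS s x lo hi ≤ j ∧ (∀ i, i < gtBS s x lo hi → s.getD i 0 ≤ x) ∧
        (∀ i, gtBS s x lo hi ≤ i → i < j → x < s.getD i 0) := by
  intro lo hi
  fun_induction gtBS s x lo hi with
  | case1 lo hi h mid hgt ih =>
    intro _ hhij hlo hhi
    have hmid1 : lo ≤ mid := by simp only [mid]; omega
    have hmid2 : mid < hi := by simp only [mid]; omega
    refine ih hmid1 (by omega) hlo ?_
    intro i hmi hij
    rcases Nat.lt_or_ge i hi with hih | hih
    · have : s.getD mid 0 ≤ s.getD i 0 := gtMono s hs hmi (by omega)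
      omega
    · exact hhi i hih hij
  | case2 lo hi h mid hle ih =>
    intro _ hhij hlo hhi
    have hmid2 : mid < hi := by simp only [mid]; omega
    have hmidlen : mid < s.length := by omega
    refine ih (by omega) hhij ?_ hhi
    intro i hi1
    rcases Nat.lt_or_ge i mid with him | him
    · have : s.getD i 0 ≤ s.getD mid 0 := gtMono s hs (le_of_lt him) hmidlen
      omega
    · have : i = mid := by omega
      subst this
      omega
  | case3 lo hi h =>
    intro hlohi hhij hlo hhi
    exact ⟨by omega, hlo, fun i hi1 hi2 => hhi i (by omega) hi2⟩

theorem gtBS_eq (s : List Int) (t : Int) (hs : s.Pairwise (· ≤ ·)) (j : Nat)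
    (hj : j ≤ s.length) :
    (j : Int) - (gtBS s (t - s.getD j 0) 0 j : Int) = (gtCnt s t 0 j : Int) := by
  obtain ⟨hrj, hlow, hhigh⟩ :=
    gtBS_inv s (t - s.getD j 0) hs j hj 0 j (Nat.zero_le _) (le_refl _)
      (by omega) (by omega)
  set r := gtBS s (t - s.getD j 0) 0 j with hr
  have hfilter : (Finset.Ico 0 j).filter (fun a => t < s.getD a 0 + s.getD j 0)
      = Finset.Ico r j := by
    ext a
    simp only [Finset.mem_filter, Finset.mem_Ico]
    constructor
    · rintro ⟨⟨-, haj⟩, hta⟩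
      refine ⟨?_, haj⟩
      by_contra har
      have := hlow a (by omega)
      omega
    · rintro ⟨har, haj⟩
      have := hhigh a har haj
      exact ⟨⟨Nat.zero_le _, haj⟩, by omega⟩
  unfold gtCnt
  rw [hfilter, Nat.card_Ico]
  push_cast [Nat.cast_sub hrj]
  ring

theorem range_map_sum (n : Nat) (f : Nat → Int) :
    ((List.range n).map f).sum = ∑ i ∈ Finset.range n, f i := rfl

-- ===== VERDICT (by name: the statement is the Claim_ definition above) =====
theorem greater_than_spec : Claim_equal_greater_than := by
  intro nums target _
  unfold Spec_greater_than greater_than greater_than_alt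
  set s := PySem.List.sorted nums (fun x => x) false with hsdef
  have hs : s.Pairwise (· ≤ ·) := by
    simpa using PySem.List.sorted_pairwise nums (fun x => x)
  rw [PySem.List.foldl_add, range_map_sum]
  by_cases hn : s.length = 0
  · have hnil : s = [] := List.length_eq_zero_iff.mp hn
    rw [hnil]
    rw [gtLoopA]
    simp
  · have hn1 : s.length - 1 < s.length := by omega
    rw [gtLoopA_eq s target hs 0 (s.length - 1) 0 hn1]
    have hsum : ∑ j ∈ Finset.range s.length, ((j : Int) - (gtBS s (target - s.getD j 0) 0 j : Int))
        = ∑ j ∈ Finset.range s.length, (gtCnt s target 0 j : Int) := by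
      refine Finset.sum_congr rfl ?_
      intro j hj
      exact gtBS_eq s target hs j (le_of_lt (Finset.mem_range.mp hj))
    rw [hsum]
    have hrange : Finset.range s.length = Finset.Ico 0 (s.length - 1 + 1) := by
      rw [Finset.range_eq_Ico]; congr 1; omega
    rw [hrange]
    unfold gtPairs
    push_cast
    ring
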